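-- pv_equiv track=rewrite | github.com/ckdfh0917/Algorithm | 백준/1244. 스위치 켜고 끄기.py | women
-- ===== SOURCE A (Python) =====
-- def women(stu_num, len_num, switch_list):
--     # 자기 번호 바꾸기
--     if switch_list[stu_num-1] == 1:
--         switch_list[stu_num-1] = 0
--     else:
--         switch_list[stu_num-1] = 1
--     # 인접한 번호 바꾸기
--     i = 1
--     while stu_num-i-1 >= 0 and stu_num+i-1 < len_num:
--         if switch_list[stu_num-i-1] == switch_list[stu_num+i-1]:
--             if switch_list[stu_num-i-1] == 1:
--                 switch_list[stu_num-i-1] = 0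
--                 switch_list[stu_num+i-1] = 0
--             elif switch_list[stu_num-i-1] == 0:
--                 switch_list[stu_num-i-1] = 1
--                 switch_list[stu_num+i-1] = 1
--         else:
--             break
--         i += 1
--     return switch_list
-- ===== SOURCE B (Python) =====
-- def women(stu_num, len_num, switch_list):
--     # NOTE: mutates switch_list in place, like the original.
--     c = stu_num - 1
--     switch_list[c] = 0 if switch_list[c] == 1 else 1
--     # pass 1: measure the symmetric radius (matched pairs are untouched so far)
--     r = 0
--     while c - (r + 1) >= 0 and c + (r + 1) < len_num and switch_list[c - (r + 1)] == switch_list[c + (r + 1)]: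
--         r += 1
--     # pass 2: toggle the matched pairs
--     for i in range(1, r + 1):
--         for j in (c - i, c + i):
--             if switch_list[j] == 1:
--                 switch_list[j] = 0
--             elif switch_list[j] == 0:
--                 switch_list[j] = 1
--     return switch_list
-- ===== Notes on version B (the rewrite author's own statement) =====
-- stated objective: alternative
-- what changed: A's single interleaved while-loop that checks and flips each symmetric pair in one pass is split into two differently-shaped passes: a scan that only measures the symmetric radius r, followed by a for-loop that applies the toggles to pairs 1..r.
-- outside the precondition, e.g. on women(3, 10, [0, 1, 0, 0]): A returns [0, 1, 1, 0], B returns [0, 1, 1, 0]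
import Mathlib
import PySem

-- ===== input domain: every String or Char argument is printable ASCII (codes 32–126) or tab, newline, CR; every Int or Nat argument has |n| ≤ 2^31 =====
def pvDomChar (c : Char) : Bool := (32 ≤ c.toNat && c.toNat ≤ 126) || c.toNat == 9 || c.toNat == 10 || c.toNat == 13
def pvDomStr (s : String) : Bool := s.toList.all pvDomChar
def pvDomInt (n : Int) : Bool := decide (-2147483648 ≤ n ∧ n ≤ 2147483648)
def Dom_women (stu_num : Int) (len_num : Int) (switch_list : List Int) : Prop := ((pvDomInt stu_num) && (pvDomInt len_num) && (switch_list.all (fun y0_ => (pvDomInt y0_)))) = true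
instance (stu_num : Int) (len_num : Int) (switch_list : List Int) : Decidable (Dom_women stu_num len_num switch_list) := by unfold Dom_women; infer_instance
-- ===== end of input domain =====

-- B separates A's single interleaved check-and-flip while-loop into two passes (measure the
-- symmetric radius, then apply the toggles); equivalence is about the return value (the Python
-- versions both mutate switch_list in place, in the same way).

-- ===== PORT A =====
-- A's while-loop; Option models the IndexError Python raises when an access is out of range.
def womenLoopA (stu_num len_num : Int) (i : Int) (xs : List Int) : Option (List Int) :=
  if _ : 0 ≤ stu_num - i - 1 ∧ stu_num + i - 1 < len_num then
    match PySem.List.pyGet? xs (stu_num - i - 1), PySem.List.pyGet? xs (stu_num + i - 1) with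
    | some a, some b =>
      if a = b then
        if a = 1 then
          womenLoopA stu_num len_num (i + 1)
            (PySem.List.pySetD (PySem.List.pySetD xs (stu_num - i - 1) 0) (stu_num + i - 1) 0)
        else if a = 0 then
          womenLoopA stu_num len_num (i + 1)
            (PySem.List.pySetD (PySem.List.pySetD xs (stu_num - i - 1) 1) (stu_num + i - 1) 1)
        else
          womenLoopA stu_num len_num (i + 1) xs
      else some xs   -- break
    | _, _ => none   -- IndexError
  else some xs
termination_by (stu_num - i).toNat
decreasing_by all_goals omega

def women (stu_num : Int) (len_num : Int) (switch_list : List Int) : List Int :=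
  match PySem.List.pyGet? switch_list (stu_num - 1) with
  | none => switch_list   -- Python raises IndexError here; excluded by Pre_women
  | some v =>
    let xs := PySem.List.pySetD switch_list (stu_num - 1) (if v = 1 then 0 else 1)
    (womenLoopA stu_num len_num 1 xs).getD xs   -- none = IndexError mid-loop; excluded by Pre_women

-- ===== PORT B =====
-- B's first pass: the radius scan (r is B's accumulator; it inspects pair r+1 each step).
def womenScanB (stu_num len_num : Int) (xs : List Int) (r : Int) : Option Int :=
  if _ : 0 ≤ stu_num - 1 - (r + 1) ∧ stu_num - 1 + (r + 1) < len_num then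
    match PySem.List.pyGet? xs (stu_num - 1 - (r + 1)), PySem.List.pyGet? xs (stu_num - 1 + (r + 1)) with
    | some a, some b => if a = b then womenScanB stu_num len_num xs (r + 1) else some r
    | _, _ => none   -- IndexError
  else some r
termination_by (stu_num - r).toNat
decreasing_by omega

-- one toggle of B's second pass ('if ==1 … elif ==0 …'); the index is in range whenever reached
def flipOne (xs : List Int) (j : Int) : List Int :=
  match PySem.List.pyGet? xs j with
  | some v => if v = 1 then PySem.List.pySetD xs j 0 else if v = 0 then PySem.List.pySetD xs j 1 else xs
  | none => xs

def women_alt (stu_num : Int) (len_num : Int) (switch_list : List Int) : List Int :=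
  match PySem.List.pyGet? switch_list (stu_num - 1) with
  | none => switch_list   -- IndexError; excluded by Pre_women
  | some v =>
    let c := stu_num - 1
    let xs := PySem.List.pySetD switch_list c (if v = 1 then 0 else 1)
    match womenScanB stu_num len_num xs 0 with
    | none => xs   -- IndexError during the scan; excluded by Pre_women
    | some r =>
      (PySem.List.pyRange 1 (r + 1) 1).foldl (fun acc i => flipOne (flipOne acc (c - i)) (c + i)) xs

-- ===== PRECONDITION & SPEC =====
-- Pre_ excludes inputs where an index is out of range: the center access stu_num-1, and any
-- len_num exceeding the list length that the pair loop could reach value-independently (the third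
-- disjunct is the largest right index the loop bounds allow).  This is slightly narrower than
-- 'A returns': when len_num overruns the list length, A may still return because a value mismatch
-- breaks the loop before the out-of-range access; such value-dependent returns are excluded
-- wholesale (B returns the same value there).
def Pre_women (stu_num : Int) (len_num : Int) (switch_list : List Int) : Prop :=
  PySem.Raise.InRange switch_list.length (stu_num - 1) ∧
  (stu_num ≤ 1 ∨ len_num ≤ stu_num ∨ min (2 * stu_num - 2) (len_num - 1) < (switch_list.length : Int))
instance (stu_num : Int) (len_num : Int) (switch_list : List Int) : Decidable (Pre_women stu_num len_num switch_list) := by unfold Pre_women; infer_instance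

def pvWitness_women : Int × Int × List Int := (3, 5, [1, 0, 1, 0, 1])

def Spec_women (stu_num : Int) (len_num : Int) (switch_list : List Int) (out : List Int) : Prop := out = women_alt stu_num len_num switch_list
instance (stu_num : Int) (len_num : Int) (switch_list : List Int) (out : List Int) : Decidable (Spec_women stu_num len_num switch_list out) := by unfold Spec_women; infer_instance

-- ===== CLAIM (what is proved, stated in full; the proofs are below) =====
def Claim_equal_women : Prop := ∀ (stu_num : Int) (len_num : Int) (switch_list : List Int), Dom_women stu_num len_num switch_list → Pre_women stu_num len_num switch_list → Spec_women stu_num len_num switch_list (women stu_num len_num switch_list)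

-- ===== LEMMAS AND PROOFS =====

-- the scan's answer only depends on values at the positions it actually reads
lemma scanB_congr (stu_num len_num : Int) (xs ys : List Int) (r : Int)
    (h : ∀ q : Int, r < q → 0 ≤ stu_num - 1 - q → stu_num - 1 + q < len_num →
      PySem.List.pyGet? ys (stu_num - 1 - q) = PySem.List.pyGet? xs (stu_num - 1 - q) ∧
      PySem.List.pyGet? ys (stu_num - 1 + q) = PySem.List.pyGet? xs (stu_num - 1 + q)) :
    womenScanB stu_num len_num ys r = womenScanB stu_num len_num xs r := by
  unfold womenScanB
  split
  · rename_i hg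
    obtain ⟨h1, h2⟩ := h (r + 1) (by omega) hg.1 hg.2
    rw [h1, h2]
    cases PySem.List.pyGet? xs (stu_num - 1 - (r + 1)) with
    | none => rfl
    | some a =>
      cases PySem.List.pyGet? xs (stu_num - 1 + (r + 1)) with
      | none => rfl
      | some b =>
        simp only
        split
        · exact scanB_congr stu_num len_num xs ys (r + 1)
            (fun q hq => h q (by omega))
        · rfl
  · rfl
termination_by (stu_num - r).toNat
decreasing_by omega

lemma scanB_ge (stu_num len_num : Int) (xs : List Int) (r r' : Int)
    (h : womenScanB stu_num len_num xs r = some r') : r ≤ r' := by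
  unfold womenScanB at h
  split at h
  · rename_i hg
    cases hx : PySem.List.pyGet? xs (stu_num - 1 - (r + 1)) with
    | none => rw [hx] at h; cases hy : PySem.List.pyGet? xs (stu_num - 1 + (r + 1)) <;> simp_all
    | some a =>
      cases hy : PySem.List.pyGet? xs (stu_num - 1 + (r + 1)) with
      | none => simp_all
      | some b =>
        rw [hx, hy] at h
        simp only at h
        split at h
        · have := scanB_ge stu_num len_num xs (r + 1) r' h; omega
        · simp_all
  · simp_all
termination_by (stu_num - r).toNat
decreasing_by omega

-- reading an unmodified nonnegative position through a nonnegative set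
lemma pyGet?_pySetD_ne (xs : List Int) (j k : Int) (v : Int) (hj : 0 ≤ j) (hk : 0 ≤ k) (hne : j ≠ k) :
    PySem.List.pyGet? (PySem.List.pySetD xs j v) k = PySem.List.pyGet? xs k := by
  rw [PySem.List.pySetD_of_nonneg xs v hj, PySem.List.pyGet?_of_nonneg _ hk,
      PySem.List.pyGet?_of_nonneg _ hk]
  exact List.getElem?_set_ne (by omega)

-- the heart: A's interleaved loop from pair p = B's scan (from accumulator p-1) then flips p..r
lemma loopA_eq (stu_num len_num : Int) (p : Int) (xs : List Int) (hp : 1 ≤ p)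
    (hsafe : ∀ q : Int, p ≤ q → 0 ≤ stu_num - q - 1 → stu_num + q - 1 < len_num →
      stu_num + q - 1 < (xs.length : Int)) :
    womenLoopA stu_num len_num p xs =
      (womenScanB stu_num len_num xs (p - 1)).map
        (fun r => (PySem.List.pyRange p (r + 1) 1).foldl
          (fun acc i => flipOne (flipOne acc (stu_num - 1 - i)) (stu_num - 1 + i)) xs) := by
  rw [womenLoopA, womenScanB]
  have hpi : stu_num - 1 - (p - 1 + 1) = stu_num - p - 1 := by ring
  have hpj : stu_num - 1 + (p - 1 + 1) = stu_num + p - 1 := by ring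
  have hp1 : p - 1 + 1 = p := by ring
  rw [hpi, hpj]
  split
  · rename_i hg
    have hlt : stu_num + p - 1 < (xs.length : Int) := hsafe p le_rfl hg.1 hg.2
    obtain ⟨a, ha⟩ : ∃ a, PySem.List.pyGet? xs (stu_num - p - 1) = some a := by
      rcases hx : PySem.List.pyGet? xs (stu_num - p - 1) with _ | a
      · exact absurd ((PySem.List.pyGet?_eq_none_iff _ _).mp hx)
          (not_not_intro (by simp [PySem.Raise.InRange]; omega))
      · exact ⟨a, rfl⟩
    obtain ⟨b, hb⟩ : ∃ b, PySem.List.pyGet? xs (stu_num + p - 1) = some b := by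
      rcases hx : PySem.List.pyGet? xs (stu_num + p - 1) with _ | b
      · exact absurd ((PySem.List.pyGet?_eq_none_iff _ _).mp hx)
          (not_not_intro (by simp [PySem.Raise.InRange]; omega))
      · exact ⟨b, rfl⟩
    simp only [ha, hb]
    by_cases hab : a = b
    · -- pair matches: both continue; A's flips at pair p commute out of the recursion
      subst hab
      rw [if_pos rfl, if_pos rfl, hp1]
      have hne : stu_num - p - 1 ≠ stu_num + p - 1 := by omega
      -- the list A recurses with (= xs when the value is neither 1 nor 0)
      set ys : List Int :=
        (if a = 1 then
          PySem.List.pySetD (PySem.List.pySetD xs (stu_num - p - 1) 0) (stu_num + p - 1) 0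
        else if a = 0 then
          PySem.List.pySetD (PySem.List.pySetD xs (stu_num - p - 1) 1) (stu_num + p - 1) 1
        else xs) with hys
      have hA : (if a = 1 then
            womenLoopA stu_num len_num (p + 1)
              (PySem.List.pySetD (PySem.List.pySetD xs (stu_num - p - 1) 0) (stu_num + p - 1) 0)
          else if a = 0 then
            womenLoopA stu_num len_num (p + 1)
              (PySem.List.pySetD (PySem.List.pySetD xs (stu_num - p - 1) 1) (stu_num + p - 1) 1)
          else womenLoopA stu_num len_num (p + 1) xs) = womenLoopA stu_num len_num (p + 1) ys := by
        rw [hys]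
        by_cases h1 : a = 1
        · rw [if_pos h1, if_pos h1]
        · rw [if_neg h1, if_neg h1]
          by_cases h0 : a = 0
          · rw [if_pos h0, if_pos h0]
          · rw [if_neg h0, if_neg h0]
      have hlen : ys.length = xs.length := by
        rw [hys]; split
        · simp [PySem.List.length_pySetD]
        · split
          · simp [PySem.List.length_pySetD]
          · rfl
      have hget : ∀ (v k : Int), 0 ≤ k → k ≠ stu_num - p - 1 → k ≠ stu_num + p - 1 →
          PySem.List.pyGet?
            (PySem.List.pySetD (PySem.List.pySetD xs (stu_num - p - 1) v) (stu_num + p - 1) v) k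
            = PySem.List.pyGet? xs k := by
        intro v k hk h1 h2
        rw [pyGet?_pySetD_ne _ _ _ _ (by omega) hk (by omega),
            pyGet?_pySetD_ne _ _ _ _ hg.1 hk (by omega)]
      have hyg : ∀ k : Int, 0 ≤ k → k ≠ stu_num - p - 1 → k ≠ stu_num + p - 1 →
          PySem.List.pyGet? ys k = PySem.List.pyGet? xs k := by
        intro k hk hk1 hk2
        rw [hys]; split
        · exact hget 0 k hk hk1 hk2
        · split
          · exact hget 1 k hk hk1 hk2
          · rfl
      have hstep : ys = flipOne (flipOne xs (stu_num - 1 - p)) (stu_num - 1 + p) := by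
        have e1 : stu_num - 1 - p = stu_num - p - 1 := by ring
        have e2 : stu_num - 1 + p = stu_num + p - 1 := by ring
        rw [e1, e2, hys]
        by_cases h1 : a = 1
        · have hf1 : flipOne xs (stu_num - p - 1) = PySem.List.pySetD xs (stu_num - p - 1) 0 := by
            simp [flipOne, ha, h1]
          have hro : PySem.List.pyGet? (PySem.List.pySetD xs (stu_num - p - 1) 0)
              (stu_num + p - 1) = some a := by
            rw [pyGet?_pySetD_ne _ _ _ _ hg.1 (by omega) hne]; exact hb
          have hf2 : flipOne (PySem.List.pySetD xs (stu_num - p - 1) 0) (stu_num + p - 1)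
              = PySem.List.pySetD (PySem.List.pySetD xs (stu_num - p - 1) 0) (stu_num + p - 1) 0 := by
            simp [flipOne, hro, h1]
          rw [if_pos h1, hf1, hf2]
        · by_cases h0 : a = 0
          · have hf1 : flipOne xs (stu_num - p - 1) = PySem.List.pySetD xs (stu_num - p - 1) 1 := by
              simp [flipOne, ha, h0]
            have hro : PySem.List.pyGet? (PySem.List.pySetD xs (stu_num - p - 1) 1)
                (stu_num + p - 1) = some a := by
              rw [pyGet?_pySetD_ne _ _ _ _ hg.1 (by omega) hne]; exact hb
            have hf2 : flipOne (PySem.List.pySetD xs (stu_num - p - 1) 1) (stu_num + p - 1)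
                = PySem.List.pySetD (PySem.List.pySetD xs (stu_num - p - 1) 1) (stu_num + p - 1) 1 := by
              simp [flipOne, hro, h0]
            rw [if_neg h1, if_pos h0, hf1, hf2]
          · have hf1 : flipOne xs (stu_num - p - 1) = xs := by
              simp [flipOne, ha, h1, h0]
            have hf2 : flipOne xs (stu_num + p - 1) = xs := by
              simp [flipOne, hb, h1, h0]
            rw [if_neg h1, if_neg h0, hf1, hf2]
      have hagree : womenScanB stu_num len_num ys p = womenScanB stu_num len_num xs p := by
        apply scanB_congr
        intro q hq hql hqr
        exact ⟨hyg _ (by omega) (by omega) (by omega), hyg _ (by omega) (by omega) (by omega)⟩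
      have hrec := loopA_eq stu_num len_num (p + 1) ys (by omega)
        (fun q hq h1 h2 => by rw [hlen]; exact hsafe q (by omega) h1 h2)
      rw [hA, hrec]
      have hpp : p + 1 - 1 = p := by ring
      rw [hpp, hagree]
      cases hs : womenScanB stu_num len_num xs p with
      | none => rfl
      | some r =>
        have hr := scanB_ge stu_num len_num xs p r hs
        simp only [Option.map_some]
        rw [PySem.List.pyRange_one_cons (by omega : p < r + 1), List.foldl_cons, ← hstep]
    · -- mismatch: A breaks with xs; B's scan stops at p-1, so no flips happen
      rw [if_neg hab, if_neg hab]
      simp only [Option.map_some]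
      rw [hp1, PySem.List.pyRange_one_eq_nil (by omega : p ≤ p)]
      rfl
  · -- loop bounds fail immediately: no iteration, radius p-1, no flips
    simp only [Option.map_some]
    rw [hp1, PySem.List.pyRange_one_eq_nil (by omega : p ≤ p)]
    rfl
termination_by (stu_num - p).toNat
decreasing_by omega

-- ===== VERDICT (by name: the statement is the Claim_ definition above) =====
theorem women_spec : Claim_equal_women := by
  intro stu_num len_num switch_list _ hpre
  obtain ⟨hin, hcase⟩ := hpre
  unfold Spec_women women women_alt
  obtain ⟨v, hv⟩ : ∃ v, PySem.List.pyGet? switch_list (stu_num - 1) = some v := by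
    rcases hx : PySem.List.pyGet? switch_list (stu_num - 1) with _ | v
    · exact absurd ((PySem.List.pyGet?_eq_none_iff _ _).mp hx) (not_not_intro hin)
    · exact ⟨v, rfl⟩
  rw [hv]
  simp only
  set xs := PySem.List.pySetD switch_list (stu_num - 1) (if v = 1 then 0 else 1) with hxs
  have hlen : xs.length = switch_list.length := by rw [hxs]; simp [PySem.List.length_pySetD]
  have hsafe : ∀ q : Int, 1 ≤ q → 0 ≤ stu_num - q - 1 → stu_num + q - 1 < len_num →
      stu_num + q - 1 < (xs.length : Int) := by
    intro q hq h1 h2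
    rw [hlen]
    rcases hcase with h | h | h
    · omega
    · omega
    · omega
  have := loopA_eq stu_num len_num 1 xs (le_refl 1) hsafe
  rw [show (1 : Int) - 1 = 0 from rfl] at this
  rw [this]
  cases hs : womenScanB stu_num len_num xs 0 with
  | none => rfl
  | some r => rfl
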